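-- pv_equiv track=rewrite | github.com/sturdy-robot/GPCS4 | Tools/NpCodeRPCS3ToGPCS4.py | FixStandardType
-- ===== SOURCE A (Python) =====
-- def FixStandardType(param_list):
--     new_param_list = []
--     for param in param_list:
--         new_param = param
--         new_param = new_param.replace('u8', 'uint8_t')
--         new_param = new_param.replace('u16', 'uint16_t')
--         new_param = new_param.replace('u32', 'uint32_t')
--         new_param = new_param.replace('u64', 'uint64_t')
--         new_param = new_param.replace('s8', 'int8_t')
--         new_param = new_param.replace('s16', 'int16_t')
--         new_param = new_param.replace('s32', 'int32_t')
--         new_param = new_param.replace('s64', 'int64_t')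
--         new_param_list.append(new_param)
--     return new_param_list
-- ===== SOURCE B (Python) =====
-- _TABLE = {'u8': 'uint8_t', 'u16': 'uint16_t', 'u32': 'uint32_t', 'u64': 'uint64_t',
--           's8': 'int8_t', 's16': 'int16_t', 's32': 'int32_t', 's64': 'int64_t'}
--
--
-- def _fix_one(s):
--     # one left-to-right scan; at each position try a 3-char, then a 2-char table key
--     out = []
--     i = 0
--     n = len(s)
--     while i < n:
--         rep = _TABLE.get(s[i:i + 3])
--         if rep is not None:
--             out.append(rep)
--             i += 3
--             continue
--         rep = _TABLE.get(s[i:i + 2])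
--         if rep is not None:
--             out.append(rep)
--             i += 2
--             continue
--         out.append(s[i])
--         i += 1
--     return ''.join(out)
--
--
-- def FixStandardType(param_list):
--     return [_fix_one(p) for p in param_list]
-- ===== Notes on version B (the rewrite author's own statement) =====
-- stated objective: alternative
-- what changed: Replaces eight sequential full-string str.replace passes by a single left-to-right scan that consumes each short type name via one table lookup; equivalent because no pattern overlaps another and no replacement text contains a pattern.
import Mathlib
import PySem

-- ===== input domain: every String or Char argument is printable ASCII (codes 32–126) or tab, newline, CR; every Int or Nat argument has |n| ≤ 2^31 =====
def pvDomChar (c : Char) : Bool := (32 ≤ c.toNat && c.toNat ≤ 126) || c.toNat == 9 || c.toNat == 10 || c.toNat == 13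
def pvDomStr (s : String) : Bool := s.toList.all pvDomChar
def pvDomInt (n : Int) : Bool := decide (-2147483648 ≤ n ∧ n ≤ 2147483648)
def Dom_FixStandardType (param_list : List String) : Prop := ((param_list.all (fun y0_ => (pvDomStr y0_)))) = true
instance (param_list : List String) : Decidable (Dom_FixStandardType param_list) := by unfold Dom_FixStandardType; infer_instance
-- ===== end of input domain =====

-- B replaces A's eight sequential full-string replace passes by a single left-to-right
-- table-driven scan (alternative algorithm, same results since patterns never overlap).

set_option maxRecDepth 8000


-- ===== PORT A =====
def FixStandardType (param_list : List String) : List String :=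
  param_list.foldl
    (fun new_param_list param =>
      let new_param := param
      let new_param := PySem.Str.replace new_param "u8" "uint8_t"
      let new_param := PySem.Str.replace new_param "u16" "uint16_t"
      let new_param := PySem.Str.replace new_param "u32" "uint32_t"
      let new_param := PySem.Str.replace new_param "u64" "uint64_t"
      let new_param := PySem.Str.replace new_param "s8" "int8_t"
      let new_param := PySem.Str.replace new_param "s16" "int16_t"
      let new_param := PySem.Str.replace new_param "s32" "int32_t"
      let new_param := PySem.Str.replace new_param "s64" "int64_t"
      new_param_list ++ [new_param])
    []

-- ===== PORT B =====
-- the replacement table of Source B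
def pvTable : PySem.Dict (List Char) (List Char) :=
  PySem.Dict.ofList
    [ (['u','8'], ['u','i','n','t','8','_','t'])
    , (['u','1','6'], ['u','i','n','t','1','6','_','t'])
    , (['u','3','2'], ['u','i','n','t','3','2','_','t'])
    , (['u','6','4'], ['u','i','n','t','6','4','_','t'])
    , (['s','8'], ['i','n','t','8','_','t'])
    , (['s','1','6'], ['i','n','t','1','6','_','t'])
    , (['s','3','2'], ['i','n','t','3','2','_','t'])
    , (['s','6','4'], ['i','n','t','6','4','_','t']) ]

-- Source B's while loop: at each position try the 3-char slice, then the 2-char slice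
def pvFixChars (l : List Char) : List Char :=
  match l with
  | [] => []
  | c :: t =>
    match pvTable.get? (List.take 3 (c :: t)) with
    | some rep3 => rep3 ++ pvFixChars (List.drop 2 t)
    | none =>
      match pvTable.get? (List.take 2 (c :: t)) with
      | some rep2 => rep2 ++ pvFixChars (List.drop 1 t)
      | none => c :: pvFixChars t
termination_by l.length
decreasing_by all_goals simp [List.length_drop] <;> omega

def FixStandardType_alt (param_list : List String) : List String :=
  param_list.map (fun p => String.ofList (pvFixChars p.toList))

-- ===== PRECONDITION & SPEC =====
def Spec_FixStandardType (param_list : List String) (out : List String) : Prop := out = FixStandardType_alt param_list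
instance (param_list : List String) (out : List String) : Decidable (Spec_FixStandardType param_list out) := by unfold Spec_FixStandardType; infer_instance

-- ===== CLAIM (what is proved, stated in full; the proofs are below) =====
def Claim_equal_FixStandardType : Prop := ∀ (param_list : List String), Dom_FixStandardType param_list → Spec_FixStandardType param_list (FixStandardType param_list)

-- ===== LEMMAS AND PROOFS =====

-- a clean recursion equal to PySem.Chars.replace for a nonempty pattern
def repl : List Char → List Char → List Char → List Char
  | _, _, [] => []
  | [], _, l => l
  | o :: ot, nv, c :: t =>
    if (o :: ot) <+: (c :: t) then nv ++ repl (o :: ot) nv ((c :: t).drop (o :: ot).length)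
    else c :: repl (o :: ot) nv t
termination_by _ _ l => l.length
decreasing_by all_goals simp [List.length_drop] <;> omega

theorem repl_nil (o : Char) (ot nv : List Char) : repl (o::ot) nv [] = [] := by rw [repl]

theorem repl_cons_pos (o : Char) (ot nv : List Char) (c : Char) (t : List Char)
    (h : (o :: ot) <+: (c :: t)) :
    repl (o :: ot) nv (c :: t) = nv ++ repl (o :: ot) nv ((c :: t).drop (o :: ot).length) := by
  rw [repl]; rw [if_pos h]

theorem repl_cons_neg (o : Char) (ot nv : List Char) (c : Char) (t : List Char)
    (h : ¬ (o :: ot) <+: (c :: t)) :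
    repl (o :: ot) nv (c :: t) = c :: repl (o :: ot) nv t := by
  rw [repl]; rw [if_neg h]

theorem go_eq (o : Char) (ot nv : List Char) :
    ∀ fuel (l acc : List Char), l.length ≤ fuel →
      PySem.Chars.replace.go (o::ot) nv fuel l acc = acc.reverse ++ repl (o::ot) nv l := by
  intro fuel
  induction fuel with
  | zero =>
    intro l acc h
    have : l = [] := List.length_eq_zero_iff.mp (Nat.le_zero.mp h)
    subst this
    simp [PySem.Chars.replace.go, repl_nil]
  | succ n ih =>
    intro l acc h
    match l with
    | [] => simp [PySem.Chars.replace.go, repl_nil]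
    | c :: t =>
      rw [PySem.Chars.replace.go]
      by_cases hp : (o::ot) <+: (c::t)
      · have hp' : (o::ot).isPrefixOf (c::t) = true := by rwa [List.isPrefixOf_iff_prefix]
        rw [if_pos hp', repl_cons_pos _ _ _ _ _ hp]
        rw [ih _ _ (by simp at h ⊢; omega)]
        simp
      · have hp' : ¬ (o::ot).isPrefixOf (c::t) = true := by rwa [List.isPrefixOf_iff_prefix]
        rw [if_neg hp', repl_cons_neg _ _ _ _ _ hp]
        rw [ih _ _ (by simp at h; omega)]
        simp

theorem replace_eq_repl (s : List Char) (o : Char) (ot nv : List Char) :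
    PySem.Chars.replace s (o::ot) nv = repl (o::ot) nv s := by
  rw [PySem.Chars.replace]
  simp [go_eq o ot nv s.length s [] le_rfl]


-- p prefix of an append splits
theorem prefix_append_cases {α : Type} (p x t : List α) (h : p <+: x ++ t) :
    p <+: x ∨ x <+: p := by
  induction x generalizing p with
  | nil => exact Or.inr (List.nil_prefix)
  | cons a x ih =>
    match p with
    | [] => exact Or.inl List.nil_prefix
    | b :: p' =>
      rw [List.cons_append, List.cons_prefix_cons] at h
      obtain ⟨rfl, h2⟩ := h
      rcases ih p' h2 with h3 | h3
      · exact Or.inl (List.cons_prefix_cons.mpr ⟨rfl, h3⟩)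
      · exact Or.inr (List.cons_prefix_cons.mpr ⟨rfl, h3⟩)

-- replacement distributes over a block in which the pattern cannot start
theorem repl_distrib (o : Char) (ot nv : List Char) (w : List Char)
    (hw : ∀ i, i < w.length → ¬ (o :: ot) <+: w.drop i ∧ ¬ (w.drop i <+: o :: ot)) :
    ∀ t, repl (o :: ot) nv (w ++ t) = w ++ repl (o :: ot) nv t := by
  induction w with
  | nil => intro t; rfl
  | cons a w' ih =>
    intro t
    have h0 := hw 0 (by simp)
    simp only [List.drop_zero] at h0
    have hnp : ¬ (o :: ot) <+: (a :: (w' ++ t)) := by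
      intro hpre
      rcases prefix_append_cases (o :: ot) (a :: w') t hpre with h | h
      · exact h0.1 h
      · exact h0.2 h
    rw [List.cons_append, repl_cons_neg _ _ _ _ _ hnp]
    rw [ih (fun i hi => hw (i + 1) (by simpa using Nat.succ_lt_succ hi)) t]
    simp

-- a block starting with n0 cannot create an occurrence of a word avoiding n0
theorem repl_pres (o : Char) (ot : List Char) (n0 : Char) (nt : List Char) :
    ∀ n (l : List Char), l.length ≤ n → ∀ (d : List Char), (∀ x ∈ d, x ≠ n0) →
      d <+: repl (o :: ot) (n0 :: nt) l → d <+: l := by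
  intro n
  induction n with
  | zero =>
    intro l hl d _ h
    have : l = [] := List.length_eq_zero_iff.mp (Nat.le_zero.mp hl)
    subst this
    rwa [repl_nil] at h
  | succ n ih =>
    intro l hl d hd h
    match l with
    | [] => rwa [repl_nil] at h
    | c :: t =>
      by_cases hp : (o :: ot) <+: (c :: t)
      · rw [repl_cons_pos _ _ _ _ _ hp] at h
        rcases prefix_append_cases d (n0 :: nt) _ h with h1 | h1
        · match d with
          | [] => exact List.nil_prefix
          | x :: d' =>
            rw [List.cons_prefix_cons] at h1
            exact absurd h1.1 (hd x (by simp))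
        · obtain ⟨r, rfl⟩ := h1
          exact absurd rfl (hd n0 (by simp))
      · rw [repl_cons_neg _ _ _ _ _ hp] at h
        match d with
        | [] => exact List.nil_prefix
        | x :: d' =>
          rw [List.cons_prefix_cons] at h
          obtain ⟨rfl, h2⟩ := h
          have := ih t (by simp at hl; omega) d' (fun y hy => hd y (List.mem_cons_of_mem _ hy)) h2
          exact List.cons_prefix_cons.mpr ⟨rfl, this⟩

-- convenient wrapper
theorem repl_pres' (o : Char) (ot : List Char) (n0 : Char) (nt : List Char)
    (l d : List Char) (hd : ∀ x ∈ d, x ≠ n0)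
    (h : ¬ d <+: l) : ¬ d <+: repl (o :: ot) (n0 :: nt) l :=
  fun hc => h (repl_pres o ot n0 nt l.length l le_rfl d hd hc)

theorem take_eq_imp_prefix {t xs : List Char} {n : Nat} (h : t.take n = xs) : xs <+: t :=
  h ▸ List.take_prefix n t

theorem table_get_none (k : List Char)
    (h1 : k ≠ ['u','8']) (h2 : k ≠ ['u','1','6']) (h3 : k ≠ ['u','3','2'])
    (h4 : k ≠ ['u','6','4']) (h5 : k ≠ ['s','8']) (h6 : k ≠ ['s','1','6'])
    (h7 : k ≠ ['s','3','2']) (h8 : k ≠ ['s','6','4']) :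
    pvTable.get? k = none := by
  rw [PySem.Dict.get?_eq_none_iff_not_mem_keys]
  have hk : pvTable.keys = [['u','8'], ['u','1','6'], ['u','3','2'], ['u','6','4'],
      ['s','8'], ['s','1','6'], ['s','3','2'], ['s','6','4']] := by decide
  rw [hk]
  simp [h1, h2, h3, h4, h5, h6, h7, h8]

-- named stages of A's chain
def rU8 : List Char → List Char := repl ['u','8'] ['u','i','n','t','8','_','t']
def rU16 : List Char → List Char := repl ['u','1','6'] ['u','i','n','t','1','6','_','t']
def rU32 : List Char → List Char := repl ['u','3','2'] ['u','i','n','t','3','2','_','t']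
def rU64 : List Char → List Char := repl ['u','6','4'] ['u','i','n','t','6','4','_','t']
def rS8 : List Char → List Char := repl ['s','8'] ['i','n','t','8','_','t']
def rS16 : List Char → List Char := repl ['s','1','6'] ['i','n','t','1','6','_','t']
def rS32 : List Char → List Char := repl ['s','3','2'] ['i','n','t','3','2','_','t']
def rS64 : List Char → List Char := repl ['s','6','4'] ['i','n','t','6','4','_','t']

def pvComp (l : List Char) : List Char :=
  rS64 (rS32 (rS16 (rS8 (rU64 (rU32 (rU16 (rU8 (l))))))))

theorem comp_nil : pvComp [] = [] := by
  simp [pvComp, rU8, rU16, rU32, rU64, rS8, rS16, rS32, rS64, repl_nil]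

theorem comp_other (c : Char) (t : List Char) (hu : c ≠ 'u') (hs : c ≠ 's') :
    pvComp (c :: t) = c :: pvComp t := by
  unfold pvComp
  rw [show rU8 (c :: t) = c :: rU8 (t) from
    repl_cons_neg _ _ _ _ _ (by rw [List.cons_prefix_cons]; exact fun hh => hu hh.1.symm)]
  rw [show rU16 (c :: rU8 (t)) = c :: rU16 (rU8 (t)) from
    repl_cons_neg _ _ _ _ _ (by rw [List.cons_prefix_cons]; exact fun hh => hu hh.1.symm)]
  rw [show rU32 (c :: rU16 (rU8 (t))) = c :: rU32 (rU16 (rU8 (t))) from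
    repl_cons_neg _ _ _ _ _ (by rw [List.cons_prefix_cons]; exact fun hh => hu hh.1.symm)]
  rw [show rU64 (c :: rU32 (rU16 (rU8 (t)))) = c :: rU64 (rU32 (rU16 (rU8 (t)))) from
    repl_cons_neg _ _ _ _ _ (by rw [List.cons_prefix_cons]; exact fun hh => hu hh.1.symm)]
  rw [show rS8 (c :: rU64 (rU32 (rU16 (rU8 (t))))) = c :: rS8 (rU64 (rU32 (rU16 (rU8 (t))))) from
    repl_cons_neg _ _ _ _ _ (by rw [List.cons_prefix_cons]; exact fun hh => hs hh.1.symm)]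
  rw [show rS16 (c :: rS8 (rU64 (rU32 (rU16 (rU8 (t)))))) = c :: rS16 (rS8 (rU64 (rU32 (rU16 (rU8 (t)))))) from
    repl_cons_neg _ _ _ _ _ (by rw [List.cons_prefix_cons]; exact fun hh => hs hh.1.symm)]
  rw [show rS32 (c :: rS16 (rS8 (rU64 (rU32 (rU16 (rU8 (t))))))) = c :: rS32 (rS16 (rS8 (rU64 (rU32 (rU16 (rU8 (t))))))) from
    repl_cons_neg _ _ _ _ _ (by rw [List.cons_prefix_cons]; exact fun hh => hs hh.1.symm)]
  rw [show rS64 (c :: rS32 (rS16 (rS8 (rU64 (rU32 (rU16 (rU8 (t)))))))) = c :: rS64 (rS32 (rS16 (rS8 (rU64 (rU32 (rU16 (rU8 (t)))))))) from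
    repl_cons_neg _ _ _ _ _ (by rw [List.cons_prefix_cons]; exact fun hh => hs hh.1.symm)]

theorem comp_u_default (t : List Char)
    (h8 : ¬ ['8'] <+: t) (h16 : ¬ ['1','6'] <+: t)
    (h32 : ¬ ['3','2'] <+: t) (h64 : ¬ ['6','4'] <+: t) :
    pvComp ('u' :: t) = 'u' :: pvComp t := by
  unfold pvComp
  rw [show rU8 ('u' :: t) = 'u' :: rU8 (t) from
    repl_cons_neg _ _ _ _ _ (by
      rw [List.cons_prefix_cons]
      exact fun hh => (h8) hh.2)]
  rw [show rU16 ('u' :: rU8 (t)) = 'u' :: rU16 (rU8 (t)) from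
    repl_cons_neg _ _ _ _ _ (by
      rw [List.cons_prefix_cons]
      exact fun hh => ((repl_pres' 'u' ['8'] 'u' ['i','n','t','8','_','t'] (t) ['1','6'] (by simp)
        h16)) hh.2)]
  rw [show rU32 ('u' :: rU16 (rU8 (t))) = 'u' :: rU32 (rU16 (rU8 (t))) from
    repl_cons_neg _ _ _ _ _ (by
      rw [List.cons_prefix_cons]
      exact fun hh => ((repl_pres' 'u' ['1','6'] 'u' ['i','n','t','1','6','_','t'] (rU8 (t)) ['3','2'] (by simp)
        (repl_pres' 'u' ['8'] 'u' ['i','n','t','8','_','t'] (t) ['3','2'] (by simp)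
        h32))) hh.2)]
  rw [show rU64 ('u' :: rU32 (rU16 (rU8 (t)))) = 'u' :: rU64 (rU32 (rU16 (rU8 (t)))) from
    repl_cons_neg _ _ _ _ _ (by
      rw [List.cons_prefix_cons]
      exact fun hh => ((repl_pres' 'u' ['3','2'] 'u' ['i','n','t','3','2','_','t'] (rU16 (rU8 (t))) ['6','4'] (by simp)
        (repl_pres' 'u' ['1','6'] 'u' ['i','n','t','1','6','_','t'] (rU8 (t)) ['6','4'] (by simp)
        (repl_pres' 'u' ['8'] 'u' ['i','n','t','8','_','t'] (t) ['6','4'] (by simp)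
        h64)))) hh.2)]
  rw [show rS8 ('u' :: rU64 (rU32 (rU16 (rU8 (t))))) = 'u' :: rS8 (rU64 (rU32 (rU16 (rU8 (t))))) from
    repl_cons_neg _ _ _ _ _ (by rw [List.cons_prefix_cons]; exact fun hh => absurd hh.1 (by decide))]
  rw [show rS16 ('u' :: rS8 (rU64 (rU32 (rU16 (rU8 (t)))))) = 'u' :: rS16 (rS8 (rU64 (rU32 (rU16 (rU8 (t)))))) from
    repl_cons_neg _ _ _ _ _ (by rw [List.cons_prefix_cons]; exact fun hh => absurd hh.1 (by decide))]
  rw [show rS32 ('u' :: rS16 (rS8 (rU64 (rU32 (rU16 (rU8 (t))))))) = 'u' :: rS32 (rS16 (rS8 (rU64 (rU32 (rU16 (rU8 (t))))))) from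
    repl_cons_neg _ _ _ _ _ (by rw [List.cons_prefix_cons]; exact fun hh => absurd hh.1 (by decide))]
  rw [show rS64 ('u' :: rS32 (rS16 (rS8 (rU64 (rU32 (rU16 (rU8 (t)))))))) = 'u' :: rS64 (rS32 (rS16 (rS8 (rU64 (rU32 (rU16 (rU8 (t)))))))) from
    repl_cons_neg _ _ _ _ _ (by rw [List.cons_prefix_cons]; exact fun hh => absurd hh.1 (by decide))]
theorem comp_s_default (t : List Char)
    (h8 : ¬ ['8'] <+: t) (h16 : ¬ ['1','6'] <+: t)
    (h32 : ¬ ['3','2'] <+: t) (h64 : ¬ ['6','4'] <+: t) :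
    pvComp ('s' :: t) = 's' :: pvComp t := by
  unfold pvComp
  rw [show rU8 ('s' :: t) = 's' :: rU8 (t) from
    repl_cons_neg _ _ _ _ _ (by rw [List.cons_prefix_cons]; exact fun hh => absurd hh.1 (by decide))]
  rw [show rU16 ('s' :: rU8 (t)) = 's' :: rU16 (rU8 (t)) from
    repl_cons_neg _ _ _ _ _ (by rw [List.cons_prefix_cons]; exact fun hh => absurd hh.1 (by decide))]
  rw [show rU32 ('s' :: rU16 (rU8 (t))) = 's' :: rU32 (rU16 (rU8 (t))) from
    repl_cons_neg _ _ _ _ _ (by rw [List.cons_prefix_cons]; exact fun hh => absurd hh.1 (by decide))]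
  rw [show rU64 ('s' :: rU32 (rU16 (rU8 (t)))) = 's' :: rU64 (rU32 (rU16 (rU8 (t)))) from
    repl_cons_neg _ _ _ _ _ (by rw [List.cons_prefix_cons]; exact fun hh => absurd hh.1 (by decide))]
  rw [show rS8 ('s' :: rU64 (rU32 (rU16 (rU8 (t))))) = 's' :: rS8 (rU64 (rU32 (rU16 (rU8 (t))))) from
    repl_cons_neg _ _ _ _ _ (by
      rw [List.cons_prefix_cons]
      exact fun hh => ((repl_pres' 'u' ['6','4'] 'u' ['i','n','t','6','4','_','t'] (rU32 (rU16 (rU8 (t)))) ['8'] (by simp)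
        (repl_pres' 'u' ['3','2'] 'u' ['i','n','t','3','2','_','t'] (rU16 (rU8 (t))) ['8'] (by simp)
        (repl_pres' 'u' ['1','6'] 'u' ['i','n','t','1','6','_','t'] (rU8 (t)) ['8'] (by simp)
        (repl_pres' 'u' ['8'] 'u' ['i','n','t','8','_','t'] (t) ['8'] (by simp)
        h8))))) hh.2)]
  rw [show rS16 ('s' :: rS8 (rU64 (rU32 (rU16 (rU8 (t)))))) = 's' :: rS16 (rS8 (rU64 (rU32 (rU16 (rU8 (t)))))) from
    repl_cons_neg _ _ _ _ _ (by
      rw [List.cons_prefix_cons]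
      exact fun hh => ((repl_pres' 's' ['8'] 'i' ['n','t','8','_','t'] (rU64 (rU32 (rU16 (rU8 (t))))) ['1','6'] (by simp)
        (repl_pres' 'u' ['6','4'] 'u' ['i','n','t','6','4','_','t'] (rU32 (rU16 (rU8 (t)))) ['1','6'] (by simp)
        (repl_pres' 'u' ['3','2'] 'u' ['i','n','t','3','2','_','t'] (rU16 (rU8 (t))) ['1','6'] (by simp)
        (repl_pres' 'u' ['1','6'] 'u' ['i','n','t','1','6','_','t'] (rU8 (t)) ['1','6'] (by simp)
        (repl_pres' 'u' ['8'] 'u' ['i','n','t','8','_','t'] (t) ['1','6'] (by simp)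
        h16)))))) hh.2)]
  rw [show rS32 ('s' :: rS16 (rS8 (rU64 (rU32 (rU16 (rU8 (t))))))) = 's' :: rS32 (rS16 (rS8 (rU64 (rU32 (rU16 (rU8 (t))))))) from
    repl_cons_neg _ _ _ _ _ (by
      rw [List.cons_prefix_cons]
      exact fun hh => ((repl_pres' 's' ['1','6'] 'i' ['n','t','1','6','_','t'] (rS8 (rU64 (rU32 (rU16 (rU8 (t)))))) ['3','2'] (by simp)
        (repl_pres' 's' ['8'] 'i' ['n','t','8','_','t'] (rU64 (rU32 (rU16 (rU8 (t))))) ['3','2'] (by simp)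
        (repl_pres' 'u' ['6','4'] 'u' ['i','n','t','6','4','_','t'] (rU32 (rU16 (rU8 (t)))) ['3','2'] (by simp)
        (repl_pres' 'u' ['3','2'] 'u' ['i','n','t','3','2','_','t'] (rU16 (rU8 (t))) ['3','2'] (by simp)
        (repl_pres' 'u' ['1','6'] 'u' ['i','n','t','1','6','_','t'] (rU8 (t)) ['3','2'] (by simp)
        (repl_pres' 'u' ['8'] 'u' ['i','n','t','8','_','t'] (t) ['3','2'] (by simp)
        h32))))))) hh.2)]
  rw [show rS64 ('s' :: rS32 (rS16 (rS8 (rU64 (rU32 (rU16 (rU8 (t)))))))) = 's' :: rS64 (rS32 (rS16 (rS8 (rU64 (rU32 (rU16 (rU8 (t)))))))) from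
    repl_cons_neg _ _ _ _ _ (by
      rw [List.cons_prefix_cons]
      exact fun hh => ((repl_pres' 's' ['3','2'] 'i' ['n','t','3','2','_','t'] (rS16 (rS8 (rU64 (rU32 (rU16 (rU8 (t))))))) ['6','4'] (by simp)
        (repl_pres' 's' ['1','6'] 'i' ['n','t','1','6','_','t'] (rS8 (rU64 (rU32 (rU16 (rU8 (t)))))) ['6','4'] (by simp)
        (repl_pres' 's' ['8'] 'i' ['n','t','8','_','t'] (rU64 (rU32 (rU16 (rU8 (t))))) ['6','4'] (by simp)
        (repl_pres' 'u' ['6','4'] 'u' ['i','n','t','6','4','_','t'] (rU32 (rU16 (rU8 (t)))) ['6','4'] (by simp)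
        (repl_pres' 'u' ['3','2'] 'u' ['i','n','t','3','2','_','t'] (rU16 (rU8 (t))) ['6','4'] (by simp)
        (repl_pres' 'u' ['1','6'] 'u' ['i','n','t','1','6','_','t'] (rU8 (t)) ['6','4'] (by simp)
        (repl_pres' 'u' ['8'] 'u' ['i','n','t','8','_','t'] (t) ['6','4'] (by simp)
        h64)))))))) hh.2)]

theorem comp_u8 (t : List Char) :
    pvComp ('u' :: '8' :: t) = ['u','i','n','t','8','_','t'] ++ pvComp t := by
  unfold pvComp
  rw [show rU8 ('u' :: '8' :: t) = ['u','i','n','t','8','_','t'] ++ rU8 (t) from by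
    unfold rU8; rw [repl_cons_pos _ _ _ _ _ (by simp [List.cons_prefix_cons])]; rfl]
  rw [show rU16 (['u','i','n','t','8','_','t'] ++ rU8 (t)) = ['u','i','n','t','8','_','t'] ++ rU16 (rU8 (t)) from
    repl_distrib _ _ _ _ (by decide) _]
  rw [show rU32 (['u','i','n','t','8','_','t'] ++ rU16 (rU8 (t))) = ['u','i','n','t','8','_','t'] ++ rU32 (rU16 (rU8 (t))) from
    repl_distrib _ _ _ _ (by decide) _]
  rw [show rU64 (['u','i','n','t','8','_','t'] ++ rU32 (rU16 (rU8 (t)))) = ['u','i','n','t','8','_','t'] ++ rU64 (rU32 (rU16 (rU8 (t)))) from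
    repl_distrib _ _ _ _ (by decide) _]
  rw [show rS8 (['u','i','n','t','8','_','t'] ++ rU64 (rU32 (rU16 (rU8 (t))))) = ['u','i','n','t','8','_','t'] ++ rS8 (rU64 (rU32 (rU16 (rU8 (t))))) from
    repl_distrib _ _ _ _ (by decide) _]
  rw [show rS16 (['u','i','n','t','8','_','t'] ++ rS8 (rU64 (rU32 (rU16 (rU8 (t)))))) = ['u','i','n','t','8','_','t'] ++ rS16 (rS8 (rU64 (rU32 (rU16 (rU8 (t)))))) from
    repl_distrib _ _ _ _ (by decide) _]
  rw [show rS32 (['u','i','n','t','8','_','t'] ++ rS16 (rS8 (rU64 (rU32 (rU16 (rU8 (t))))))) = ['u','i','n','t','8','_','t'] ++ rS32 (rS16 (rS8 (rU64 (rU32 (rU16 (rU8 (t))))))) from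
    repl_distrib _ _ _ _ (by decide) _]
  rw [show rS64 (['u','i','n','t','8','_','t'] ++ rS32 (rS16 (rS8 (rU64 (rU32 (rU16 (rU8 (t)))))))) = ['u','i','n','t','8','_','t'] ++ rS64 (rS32 (rS16 (rS8 (rU64 (rU32 (rU16 (rU8 (t)))))))) from
    repl_distrib _ _ _ _ (by decide) _]

theorem comp_u16 (t : List Char) :
    pvComp ('u' :: '1' :: '6' :: t) = ['u','i','n','t','1','6','_','t'] ++ pvComp t := by
  unfold pvComp
  rw [show rU8 ('u' :: '1' :: '6' :: t) = 'u' :: rU8 ('1' :: '6' :: t) from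
    repl_cons_neg _ _ _ _ _ (by simp [List.cons_prefix_cons])]
  rw [show rU8 ('1' :: '6' :: t) = '1' :: rU8 ('6' :: t) from
    repl_cons_neg _ _ _ _ _ (by simp [List.cons_prefix_cons])]
  rw [show rU8 ('6' :: t) = '6' :: rU8 (t) from
    repl_cons_neg _ _ _ _ _ (by simp [List.cons_prefix_cons])]
  rw [show rU16 ('u' :: '1' :: '6' :: rU8 (t)) = ['u','i','n','t','1','6','_','t'] ++ rU16 (rU8 (t)) from by
    unfold rU16; rw [repl_cons_pos _ _ _ _ _ (by simp [List.cons_prefix_cons])]; rfl]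
  rw [show rU32 (['u','i','n','t','1','6','_','t'] ++ rU16 (rU8 (t))) = ['u','i','n','t','1','6','_','t'] ++ rU32 (rU16 (rU8 (t))) from
    repl_distrib _ _ _ _ (by decide) _]
  rw [show rU64 (['u','i','n','t','1','6','_','t'] ++ rU32 (rU16 (rU8 (t)))) = ['u','i','n','t','1','6','_','t'] ++ rU64 (rU32 (rU16 (rU8 (t)))) from
    repl_distrib _ _ _ _ (by decide) _]
  rw [show rS8 (['u','i','n','t','1','6','_','t'] ++ rU64 (rU32 (rU16 (rU8 (t))))) = ['u','i','n','t','1','6','_','t'] ++ rS8 (rU64 (rU32 (rU16 (rU8 (t))))) from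
    repl_distrib _ _ _ _ (by decide) _]
  rw [show rS16 (['u','i','n','t','1','6','_','t'] ++ rS8 (rU64 (rU32 (rU16 (rU8 (t)))))) = ['u','i','n','t','1','6','_','t'] ++ rS16 (rS8 (rU64 (rU32 (rU16 (rU8 (t)))))) from
    repl_distrib _ _ _ _ (by decide) _]
  rw [show rS32 (['u','i','n','t','1','6','_','t'] ++ rS16 (rS8 (rU64 (rU32 (rU16 (rU8 (t))))))) = ['u','i','n','t','1','6','_','t'] ++ rS32 (rS16 (rS8 (rU64 (rU32 (rU16 (rU8 (t))))))) from
    repl_distrib _ _ _ _ (by decide) _]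
  rw [show rS64 (['u','i','n','t','1','6','_','t'] ++ rS32 (rS16 (rS8 (rU64 (rU32 (rU16 (rU8 (t)))))))) = ['u','i','n','t','1','6','_','t'] ++ rS64 (rS32 (rS16 (rS8 (rU64 (rU32 (rU16 (rU8 (t)))))))) from
    repl_distrib _ _ _ _ (by decide) _]

theorem comp_u32 (t : List Char) :
    pvComp ('u' :: '3' :: '2' :: t) = ['u','i','n','t','3','2','_','t'] ++ pvComp t := by
  unfold pvComp
  rw [show rU8 ('u' :: '3' :: '2' :: t) = 'u' :: rU8 ('3' :: '2' :: t) from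
    repl_cons_neg _ _ _ _ _ (by simp [List.cons_prefix_cons])]
  rw [show rU8 ('3' :: '2' :: t) = '3' :: rU8 ('2' :: t) from
    repl_cons_neg _ _ _ _ _ (by simp [List.cons_prefix_cons])]
  rw [show rU8 ('2' :: t) = '2' :: rU8 (t) from
    repl_cons_neg _ _ _ _ _ (by simp [List.cons_prefix_cons])]
  rw [show rU16 ('u' :: '3' :: '2' :: rU8 (t)) = 'u' :: rU16 ('3' :: '2' :: rU8 (t)) from
    repl_cons_neg _ _ _ _ _ (by simp [List.cons_prefix_cons])]
  rw [show rU16 ('3' :: '2' :: rU8 (t)) = '3' :: rU16 ('2' :: rU8 (t)) from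
    repl_cons_neg _ _ _ _ _ (by simp [List.cons_prefix_cons])]
  rw [show rU16 ('2' :: rU8 (t)) = '2' :: rU16 (rU8 (t)) from
    repl_cons_neg _ _ _ _ _ (by simp [List.cons_prefix_cons])]
  rw [show rU32 ('u' :: '3' :: '2' :: rU16 (rU8 (t))) = ['u','i','n','t','3','2','_','t'] ++ rU32 (rU16 (rU8 (t))) from by
    unfold rU32; rw [repl_cons_pos _ _ _ _ _ (by simp [List.cons_prefix_cons])]; rfl]
  rw [show rU64 (['u','i','n','t','3','2','_','t'] ++ rU32 (rU16 (rU8 (t)))) = ['u','i','n','t','3','2','_','t'] ++ rU64 (rU32 (rU16 (rU8 (t)))) from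
    repl_distrib _ _ _ _ (by decide) _]
  rw [show rS8 (['u','i','n','t','3','2','_','t'] ++ rU64 (rU32 (rU16 (rU8 (t))))) = ['u','i','n','t','3','2','_','t'] ++ rS8 (rU64 (rU32 (rU16 (rU8 (t))))) from
    repl_distrib _ _ _ _ (by decide) _]
  rw [show rS16 (['u','i','n','t','3','2','_','t'] ++ rS8 (rU64 (rU32 (rU16 (rU8 (t)))))) = ['u','i','n','t','3','2','_','t'] ++ rS16 (rS8 (rU64 (rU32 (rU16 (rU8 (t)))))) from
    repl_distrib _ _ _ _ (by decide) _]
  rw [show rS32 (['u','i','n','t','3','2','_','t'] ++ rS16 (rS8 (rU64 (rU32 (rU16 (rU8 (t))))))) = ['u','i','n','t','3','2','_','t'] ++ rS32 (rS16 (rS8 (rU64 (rU32 (rU16 (rU8 (t))))))) from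
    repl_distrib _ _ _ _ (by decide) _]
  rw [show rS64 (['u','i','n','t','3','2','_','t'] ++ rS32 (rS16 (rS8 (rU64 (rU32 (rU16 (rU8 (t)))))))) = ['u','i','n','t','3','2','_','t'] ++ rS64 (rS32 (rS16 (rS8 (rU64 (rU32 (rU16 (rU8 (t)))))))) from
    repl_distrib _ _ _ _ (by decide) _]

theorem comp_u64 (t : List Char) :
    pvComp ('u' :: '6' :: '4' :: t) = ['u','i','n','t','6','4','_','t'] ++ pvComp t := by
  unfold pvComp
  rw [show rU8 ('u' :: '6' :: '4' :: t) = 'u' :: rU8 ('6' :: '4' :: t) from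
    repl_cons_neg _ _ _ _ _ (by simp [List.cons_prefix_cons])]
  rw [show rU8 ('6' :: '4' :: t) = '6' :: rU8 ('4' :: t) from
    repl_cons_neg _ _ _ _ _ (by simp [List.cons_prefix_cons])]
  rw [show rU8 ('4' :: t) = '4' :: rU8 (t) from
    repl_cons_neg _ _ _ _ _ (by simp [List.cons_prefix_cons])]
  rw [show rU16 ('u' :: '6' :: '4' :: rU8 (t)) = 'u' :: rU16 ('6' :: '4' :: rU8 (t)) from
    repl_cons_neg _ _ _ _ _ (by simp [List.cons_prefix_cons])]
  rw [show rU16 ('6' :: '4' :: rU8 (t)) = '6' :: rU16 ('4' :: rU8 (t)) from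
    repl_cons_neg _ _ _ _ _ (by simp [List.cons_prefix_cons])]
  rw [show rU16 ('4' :: rU8 (t)) = '4' :: rU16 (rU8 (t)) from
    repl_cons_neg _ _ _ _ _ (by simp [List.cons_prefix_cons])]
  rw [show rU32 ('u' :: '6' :: '4' :: rU16 (rU8 (t))) = 'u' :: rU32 ('6' :: '4' :: rU16 (rU8 (t))) from
    repl_cons_neg _ _ _ _ _ (by simp [List.cons_prefix_cons])]
  rw [show rU32 ('6' :: '4' :: rU16 (rU8 (t))) = '6' :: rU32 ('4' :: rU16 (rU8 (t))) from
    repl_cons_neg _ _ _ _ _ (by simp [List.cons_prefix_cons])]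
  rw [show rU32 ('4' :: rU16 (rU8 (t))) = '4' :: rU32 (rU16 (rU8 (t))) from
    repl_cons_neg _ _ _ _ _ (by simp [List.cons_prefix_cons])]
  rw [show rU64 ('u' :: '6' :: '4' :: rU32 (rU16 (rU8 (t)))) = ['u','i','n','t','6','4','_','t'] ++ rU64 (rU32 (rU16 (rU8 (t)))) from by
    unfold rU64; rw [repl_cons_pos _ _ _ _ _ (by simp [List.cons_prefix_cons])]; rfl]
  rw [show rS8 (['u','i','n','t','6','4','_','t'] ++ rU64 (rU32 (rU16 (rU8 (t))))) = ['u','i','n','t','6','4','_','t'] ++ rS8 (rU64 (rU32 (rU16 (rU8 (t))))) from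
    repl_distrib _ _ _ _ (by decide) _]
  rw [show rS16 (['u','i','n','t','6','4','_','t'] ++ rS8 (rU64 (rU32 (rU16 (rU8 (t)))))) = ['u','i','n','t','6','4','_','t'] ++ rS16 (rS8 (rU64 (rU32 (rU16 (rU8 (t)))))) from
    repl_distrib _ _ _ _ (by decide) _]
  rw [show rS32 (['u','i','n','t','6','4','_','t'] ++ rS16 (rS8 (rU64 (rU32 (rU16 (rU8 (t))))))) = ['u','i','n','t','6','4','_','t'] ++ rS32 (rS16 (rS8 (rU64 (rU32 (rU16 (rU8 (t))))))) from
    repl_distrib _ _ _ _ (by decide) _]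
  rw [show rS64 (['u','i','n','t','6','4','_','t'] ++ rS32 (rS16 (rS8 (rU64 (rU32 (rU16 (rU8 (t)))))))) = ['u','i','n','t','6','4','_','t'] ++ rS64 (rS32 (rS16 (rS8 (rU64 (rU32 (rU16 (rU8 (t)))))))) from
    repl_distrib _ _ _ _ (by decide) _]

theorem comp_s8 (t : List Char) :
    pvComp ('s' :: '8' :: t) = ['i','n','t','8','_','t'] ++ pvComp t := by
  unfold pvComp
  rw [show rU8 ('s' :: '8' :: t) = 's' :: rU8 ('8' :: t) from
    repl_cons_neg _ _ _ _ _ (by simp [List.cons_prefix_cons])]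
  rw [show rU8 ('8' :: t) = '8' :: rU8 (t) from
    repl_cons_neg _ _ _ _ _ (by simp [List.cons_prefix_cons])]
  rw [show rU16 ('s' :: '8' :: rU8 (t)) = 's' :: rU16 ('8' :: rU8 (t)) from
    repl_cons_neg _ _ _ _ _ (by simp [List.cons_prefix_cons])]
  rw [show rU16 ('8' :: rU8 (t)) = '8' :: rU16 (rU8 (t)) from
    repl_cons_neg _ _ _ _ _ (by simp [List.cons_prefix_cons])]
  rw [show rU32 ('s' :: '8' :: rU16 (rU8 (t))) = 's' :: rU32 ('8' :: rU16 (rU8 (t))) from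
    repl_cons_neg _ _ _ _ _ (by simp [List.cons_prefix_cons])]
  rw [show rU32 ('8' :: rU16 (rU8 (t))) = '8' :: rU32 (rU16 (rU8 (t))) from
    repl_cons_neg _ _ _ _ _ (by simp [List.cons_prefix_cons])]
  rw [show rU64 ('s' :: '8' :: rU32 (rU16 (rU8 (t)))) = 's' :: rU64 ('8' :: rU32 (rU16 (rU8 (t)))) from
    repl_cons_neg _ _ _ _ _ (by simp [List.cons_prefix_cons])]
  rw [show rU64 ('8' :: rU32 (rU16 (rU8 (t)))) = '8' :: rU64 (rU32 (rU16 (rU8 (t)))) from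
    repl_cons_neg _ _ _ _ _ (by simp [List.cons_prefix_cons])]
  rw [show rS8 ('s' :: '8' :: rU64 (rU32 (rU16 (rU8 (t))))) = ['i','n','t','8','_','t'] ++ rS8 (rU64 (rU32 (rU16 (rU8 (t))))) from by
    unfold rS8; rw [repl_cons_pos _ _ _ _ _ (by simp [List.cons_prefix_cons])]; rfl]
  rw [show rS16 (['i','n','t','8','_','t'] ++ rS8 (rU64 (rU32 (rU16 (rU8 (t)))))) = ['i','n','t','8','_','t'] ++ rS16 (rS8 (rU64 (rU32 (rU16 (rU8 (t)))))) from
    repl_distrib _ _ _ _ (by decide) _]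
  rw [show rS32 (['i','n','t','8','_','t'] ++ rS16 (rS8 (rU64 (rU32 (rU16 (rU8 (t))))))) = ['i','n','t','8','_','t'] ++ rS32 (rS16 (rS8 (rU64 (rU32 (rU16 (rU8 (t))))))) from
    repl_distrib _ _ _ _ (by decide) _]
  rw [show rS64 (['i','n','t','8','_','t'] ++ rS32 (rS16 (rS8 (rU64 (rU32 (rU16 (rU8 (t)))))))) = ['i','n','t','8','_','t'] ++ rS64 (rS32 (rS16 (rS8 (rU64 (rU32 (rU16 (rU8 (t)))))))) from
    repl_distrib _ _ _ _ (by decide) _]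

theorem comp_s16 (t : List Char) :
    pvComp ('s' :: '1' :: '6' :: t) = ['i','n','t','1','6','_','t'] ++ pvComp t := by
  unfold pvComp
  rw [show rU8 ('s' :: '1' :: '6' :: t) = 's' :: rU8 ('1' :: '6' :: t) from
    repl_cons_neg _ _ _ _ _ (by simp [List.cons_prefix_cons])]
  rw [show rU8 ('1' :: '6' :: t) = '1' :: rU8 ('6' :: t) from
    repl_cons_neg _ _ _ _ _ (by simp [List.cons_prefix_cons])]
  rw [show rU8 ('6' :: t) = '6' :: rU8 (t) from
    repl_cons_neg _ _ _ _ _ (by simp [List.cons_prefix_cons])]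
  rw [show rU16 ('s' :: '1' :: '6' :: rU8 (t)) = 's' :: rU16 ('1' :: '6' :: rU8 (t)) from
    repl_cons_neg _ _ _ _ _ (by simp [List.cons_prefix_cons])]
  rw [show rU16 ('1' :: '6' :: rU8 (t)) = '1' :: rU16 ('6' :: rU8 (t)) from
    repl_cons_neg _ _ _ _ _ (by simp [List.cons_prefix_cons])]
  rw [show rU16 ('6' :: rU8 (t)) = '6' :: rU16 (rU8 (t)) from
    repl_cons_neg _ _ _ _ _ (by simp [List.cons_prefix_cons])]
  rw [show rU32 ('s' :: '1' :: '6' :: rU16 (rU8 (t))) = 's' :: rU32 ('1' :: '6' :: rU16 (rU8 (t))) from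
    repl_cons_neg _ _ _ _ _ (by simp [List.cons_prefix_cons])]
  rw [show rU32 ('1' :: '6' :: rU16 (rU8 (t))) = '1' :: rU32 ('6' :: rU16 (rU8 (t))) from
    repl_cons_neg _ _ _ _ _ (by simp [List.cons_prefix_cons])]
  rw [show rU32 ('6' :: rU16 (rU8 (t))) = '6' :: rU32 (rU16 (rU8 (t))) from
    repl_cons_neg _ _ _ _ _ (by simp [List.cons_prefix_cons])]
  rw [show rU64 ('s' :: '1' :: '6' :: rU32 (rU16 (rU8 (t)))) = 's' :: rU64 ('1' :: '6' :: rU32 (rU16 (rU8 (t)))) from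
    repl_cons_neg _ _ _ _ _ (by simp [List.cons_prefix_cons])]
  rw [show rU64 ('1' :: '6' :: rU32 (rU16 (rU8 (t)))) = '1' :: rU64 ('6' :: rU32 (rU16 (rU8 (t)))) from
    repl_cons_neg _ _ _ _ _ (by simp [List.cons_prefix_cons])]
  rw [show rU64 ('6' :: rU32 (rU16 (rU8 (t)))) = '6' :: rU64 (rU32 (rU16 (rU8 (t)))) from
    repl_cons_neg _ _ _ _ _ (by simp [List.cons_prefix_cons])]
  rw [show rS8 ('s' :: '1' :: '6' :: rU64 (rU32 (rU16 (rU8 (t))))) = 's' :: rS8 ('1' :: '6' :: rU64 (rU32 (rU16 (rU8 (t))))) from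
    repl_cons_neg _ _ _ _ _ (by simp [List.cons_prefix_cons])]
  rw [show rS8 ('1' :: '6' :: rU64 (rU32 (rU16 (rU8 (t))))) = '1' :: rS8 ('6' :: rU64 (rU32 (rU16 (rU8 (t))))) from
    repl_cons_neg _ _ _ _ _ (by simp [List.cons_prefix_cons])]
  rw [show rS8 ('6' :: rU64 (rU32 (rU16 (rU8 (t))))) = '6' :: rS8 (rU64 (rU32 (rU16 (rU8 (t))))) from
    repl_cons_neg _ _ _ _ _ (by simp [List.cons_prefix_cons])]
  rw [show rS16 ('s' :: '1' :: '6' :: rS8 (rU64 (rU32 (rU16 (rU8 (t)))))) = ['i','n','t','1','6','_','t'] ++ rS16 (rS8 (rU64 (rU32 (rU16 (rU8 (t)))))) from by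
    unfold rS16; rw [repl_cons_pos _ _ _ _ _ (by simp [List.cons_prefix_cons])]; rfl]
  rw [show rS32 (['i','n','t','1','6','_','t'] ++ rS16 (rS8 (rU64 (rU32 (rU16 (rU8 (t))))))) = ['i','n','t','1','6','_','t'] ++ rS32 (rS16 (rS8 (rU64 (rU32 (rU16 (rU8 (t))))))) from
    repl_distrib _ _ _ _ (by decide) _]
  rw [show rS64 (['i','n','t','1','6','_','t'] ++ rS32 (rS16 (rS8 (rU64 (rU32 (rU16 (rU8 (t)))))))) = ['i','n','t','1','6','_','t'] ++ rS64 (rS32 (rS16 (rS8 (rU64 (rU32 (rU16 (rU8 (t)))))))) from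
    repl_distrib _ _ _ _ (by decide) _]

theorem comp_s32 (t : List Char) :
    pvComp ('s' :: '3' :: '2' :: t) = ['i','n','t','3','2','_','t'] ++ pvComp t := by
  unfold pvComp
  rw [show rU8 ('s' :: '3' :: '2' :: t) = 's' :: rU8 ('3' :: '2' :: t) from
    repl_cons_neg _ _ _ _ _ (by simp [List.cons_prefix_cons])]
  rw [show rU8 ('3' :: '2' :: t) = '3' :: rU8 ('2' :: t) from
    repl_cons_neg _ _ _ _ _ (by simp [List.cons_prefix_cons])]
  rw [show rU8 ('2' :: t) = '2' :: rU8 (t) from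
    repl_cons_neg _ _ _ _ _ (by simp [List.cons_prefix_cons])]
  rw [show rU16 ('s' :: '3' :: '2' :: rU8 (t)) = 's' :: rU16 ('3' :: '2' :: rU8 (t)) from
    repl_cons_neg _ _ _ _ _ (by simp [List.cons_prefix_cons])]
  rw [show rU16 ('3' :: '2' :: rU8 (t)) = '3' :: rU16 ('2' :: rU8 (t)) from
    repl_cons_neg _ _ _ _ _ (by simp [List.cons_prefix_cons])]
  rw [show rU16 ('2' :: rU8 (t)) = '2' :: rU16 (rU8 (t)) from
    repl_cons_neg _ _ _ _ _ (by simp [List.cons_prefix_cons])]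
  rw [show rU32 ('s' :: '3' :: '2' :: rU16 (rU8 (t))) = 's' :: rU32 ('3' :: '2' :: rU16 (rU8 (t))) from
    repl_cons_neg _ _ _ _ _ (by simp [List.cons_prefix_cons])]
  rw [show rU32 ('3' :: '2' :: rU16 (rU8 (t))) = '3' :: rU32 ('2' :: rU16 (rU8 (t))) from
    repl_cons_neg _ _ _ _ _ (by simp [List.cons_prefix_cons])]
  rw [show rU32 ('2' :: rU16 (rU8 (t))) = '2' :: rU32 (rU16 (rU8 (t))) from
    repl_cons_neg _ _ _ _ _ (by simp [List.cons_prefix_cons])]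
  rw [show rU64 ('s' :: '3' :: '2' :: rU32 (rU16 (rU8 (t)))) = 's' :: rU64 ('3' :: '2' :: rU32 (rU16 (rU8 (t)))) from
    repl_cons_neg _ _ _ _ _ (by simp [List.cons_prefix_cons])]
  rw [show rU64 ('3' :: '2' :: rU32 (rU16 (rU8 (t)))) = '3' :: rU64 ('2' :: rU32 (rU16 (rU8 (t)))) from
    repl_cons_neg _ _ _ _ _ (by simp [List.cons_prefix_cons])]
  rw [show rU64 ('2' :: rU32 (rU16 (rU8 (t)))) = '2' :: rU64 (rU32 (rU16 (rU8 (t)))) from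
    repl_cons_neg _ _ _ _ _ (by simp [List.cons_prefix_cons])]
  rw [show rS8 ('s' :: '3' :: '2' :: rU64 (rU32 (rU16 (rU8 (t))))) = 's' :: rS8 ('3' :: '2' :: rU64 (rU32 (rU16 (rU8 (t))))) from
    repl_cons_neg _ _ _ _ _ (by simp [List.cons_prefix_cons])]
  rw [show rS8 ('3' :: '2' :: rU64 (rU32 (rU16 (rU8 (t))))) = '3' :: rS8 ('2' :: rU64 (rU32 (rU16 (rU8 (t))))) from
    repl_cons_neg _ _ _ _ _ (by simp [List.cons_prefix_cons])]
  rw [show rS8 ('2' :: rU64 (rU32 (rU16 (rU8 (t))))) = '2' :: rS8 (rU64 (rU32 (rU16 (rU8 (t))))) from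
    repl_cons_neg _ _ _ _ _ (by simp [List.cons_prefix_cons])]
  rw [show rS16 ('s' :: '3' :: '2' :: rS8 (rU64 (rU32 (rU16 (rU8 (t)))))) = 's' :: rS16 ('3' :: '2' :: rS8 (rU64 (rU32 (rU16 (rU8 (t)))))) from
    repl_cons_neg _ _ _ _ _ (by simp [List.cons_prefix_cons])]
  rw [show rS16 ('3' :: '2' :: rS8 (rU64 (rU32 (rU16 (rU8 (t)))))) = '3' :: rS16 ('2' :: rS8 (rU64 (rU32 (rU16 (rU8 (t)))))) from
    repl_cons_neg _ _ _ _ _ (by simp [List.cons_prefix_cons])]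
  rw [show rS16 ('2' :: rS8 (rU64 (rU32 (rU16 (rU8 (t)))))) = '2' :: rS16 (rS8 (rU64 (rU32 (rU16 (rU8 (t)))))) from
    repl_cons_neg _ _ _ _ _ (by simp [List.cons_prefix_cons])]
  rw [show rS32 ('s' :: '3' :: '2' :: rS16 (rS8 (rU64 (rU32 (rU16 (rU8 (t))))))) = ['i','n','t','3','2','_','t'] ++ rS32 (rS16 (rS8 (rU64 (rU32 (rU16 (rU8 (t))))))) from by
    unfold rS32; rw [repl_cons_pos _ _ _ _ _ (by simp [List.cons_prefix_cons])]; rfl]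
  rw [show rS64 (['i','n','t','3','2','_','t'] ++ rS32 (rS16 (rS8 (rU64 (rU32 (rU16 (rU8 (t)))))))) = ['i','n','t','3','2','_','t'] ++ rS64 (rS32 (rS16 (rS8 (rU64 (rU32 (rU16 (rU8 (t)))))))) from
    repl_distrib _ _ _ _ (by decide) _]

theorem comp_s64 (t : List Char) :
    pvComp ('s' :: '6' :: '4' :: t) = ['i','n','t','6','4','_','t'] ++ pvComp t := by
  unfold pvComp
  rw [show rU8 ('s' :: '6' :: '4' :: t) = 's' :: rU8 ('6' :: '4' :: t) from
    repl_cons_neg _ _ _ _ _ (by simp [List.cons_prefix_cons])]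
  rw [show rU8 ('6' :: '4' :: t) = '6' :: rU8 ('4' :: t) from
    repl_cons_neg _ _ _ _ _ (by simp [List.cons_prefix_cons])]
  rw [show rU8 ('4' :: t) = '4' :: rU8 (t) from
    repl_cons_neg _ _ _ _ _ (by simp [List.cons_prefix_cons])]
  rw [show rU16 ('s' :: '6' :: '4' :: rU8 (t)) = 's' :: rU16 ('6' :: '4' :: rU8 (t)) from
    repl_cons_neg _ _ _ _ _ (by simp [List.cons_prefix_cons])]
  rw [show rU16 ('6' :: '4' :: rU8 (t)) = '6' :: rU16 ('4' :: rU8 (t)) from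
    repl_cons_neg _ _ _ _ _ (by simp [List.cons_prefix_cons])]
  rw [show rU16 ('4' :: rU8 (t)) = '4' :: rU16 (rU8 (t)) from
    repl_cons_neg _ _ _ _ _ (by simp [List.cons_prefix_cons])]
  rw [show rU32 ('s' :: '6' :: '4' :: rU16 (rU8 (t))) = 's' :: rU32 ('6' :: '4' :: rU16 (rU8 (t))) from
    repl_cons_neg _ _ _ _ _ (by simp [List.cons_prefix_cons])]
  rw [show rU32 ('6' :: '4' :: rU16 (rU8 (t))) = '6' :: rU32 ('4' :: rU16 (rU8 (t))) from
    repl_cons_neg _ _ _ _ _ (by simp [List.cons_prefix_cons])]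
  rw [show rU32 ('4' :: rU16 (rU8 (t))) = '4' :: rU32 (rU16 (rU8 (t))) from
    repl_cons_neg _ _ _ _ _ (by simp [List.cons_prefix_cons])]
  rw [show rU64 ('s' :: '6' :: '4' :: rU32 (rU16 (rU8 (t)))) = 's' :: rU64 ('6' :: '4' :: rU32 (rU16 (rU8 (t)))) from
    repl_cons_neg _ _ _ _ _ (by simp [List.cons_prefix_cons])]
  rw [show rU64 ('6' :: '4' :: rU32 (rU16 (rU8 (t)))) = '6' :: rU64 ('4' :: rU32 (rU16 (rU8 (t)))) from
    repl_cons_neg _ _ _ _ _ (by simp [List.cons_prefix_cons])]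
  rw [show rU64 ('4' :: rU32 (rU16 (rU8 (t)))) = '4' :: rU64 (rU32 (rU16 (rU8 (t)))) from
    repl_cons_neg _ _ _ _ _ (by simp [List.cons_prefix_cons])]
  rw [show rS8 ('s' :: '6' :: '4' :: rU64 (rU32 (rU16 (rU8 (t))))) = 's' :: rS8 ('6' :: '4' :: rU64 (rU32 (rU16 (rU8 (t))))) from
    repl_cons_neg _ _ _ _ _ (by simp [List.cons_prefix_cons])]
  rw [show rS8 ('6' :: '4' :: rU64 (rU32 (rU16 (rU8 (t))))) = '6' :: rS8 ('4' :: rU64 (rU32 (rU16 (rU8 (t))))) from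
    repl_cons_neg _ _ _ _ _ (by simp [List.cons_prefix_cons])]
  rw [show rS8 ('4' :: rU64 (rU32 (rU16 (rU8 (t))))) = '4' :: rS8 (rU64 (rU32 (rU16 (rU8 (t))))) from
    repl_cons_neg _ _ _ _ _ (by simp [List.cons_prefix_cons])]
  rw [show rS16 ('s' :: '6' :: '4' :: rS8 (rU64 (rU32 (rU16 (rU8 (t)))))) = 's' :: rS16 ('6' :: '4' :: rS8 (rU64 (rU32 (rU16 (rU8 (t)))))) from
    repl_cons_neg _ _ _ _ _ (by simp [List.cons_prefix_cons])]
  rw [show rS16 ('6' :: '4' :: rS8 (rU64 (rU32 (rU16 (rU8 (t)))))) = '6' :: rS16 ('4' :: rS8 (rU64 (rU32 (rU16 (rU8 (t)))))) from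
    repl_cons_neg _ _ _ _ _ (by simp [List.cons_prefix_cons])]
  rw [show rS16 ('4' :: rS8 (rU64 (rU32 (rU16 (rU8 (t)))))) = '4' :: rS16 (rS8 (rU64 (rU32 (rU16 (rU8 (t)))))) from
    repl_cons_neg _ _ _ _ _ (by simp [List.cons_prefix_cons])]
  rw [show rS32 ('s' :: '6' :: '4' :: rS16 (rS8 (rU64 (rU32 (rU16 (rU8 (t))))))) = 's' :: rS32 ('6' :: '4' :: rS16 (rS8 (rU64 (rU32 (rU16 (rU8 (t))))))) from
    repl_cons_neg _ _ _ _ _ (by simp [List.cons_prefix_cons])]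
  rw [show rS32 ('6' :: '4' :: rS16 (rS8 (rU64 (rU32 (rU16 (rU8 (t))))))) = '6' :: rS32 ('4' :: rS16 (rS8 (rU64 (rU32 (rU16 (rU8 (t))))))) from
    repl_cons_neg _ _ _ _ _ (by simp [List.cons_prefix_cons])]
  rw [show rS32 ('4' :: rS16 (rS8 (rU64 (rU32 (rU16 (rU8 (t))))))) = '4' :: rS32 (rS16 (rS8 (rU64 (rU32 (rU16 (rU8 (t))))))) from
    repl_cons_neg _ _ _ _ _ (by simp [List.cons_prefix_cons])]
  rw [show rS64 ('s' :: '6' :: '4' :: rS32 (rS16 (rS8 (rU64 (rU32 (rU16 (rU8 (t)))))))) = ['i','n','t','6','4','_','t'] ++ rS64 (rS32 (rS16 (rS8 (rU64 (rU32 (rU16 (rU8 (t)))))))) from by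
    unfold rS64; rw [repl_cons_pos _ _ _ _ _ (by simp [List.cons_prefix_cons])]; rfl]


-- ===== per-case lemmas for the B-side scan =====

theorem scan_nil : pvFixChars [] = [] := by rw [pvFixChars]

theorem scan_u16 (t : List Char) :
    pvFixChars ('u' :: '1' :: '6' :: t) = ['u','i','n','t','1','6','_','t'] ++ pvFixChars t := by
  rw [pvFixChars]
  simp only [List.take, List.drop]
  rw [show pvTable.get? ['u','1','6'] = some ['u','i','n','t','1','6','_','t'] from by decide]

theorem scan_u32 (t : List Char) :
    pvFixChars ('u' :: '3' :: '2' :: t) = ['u','i','n','t','3','2','_','t'] ++ pvFixChars t := by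
  rw [pvFixChars]
  simp only [List.take, List.drop]
  rw [show pvTable.get? ['u','3','2'] = some ['u','i','n','t','3','2','_','t'] from by decide]

theorem scan_u64 (t : List Char) :
    pvFixChars ('u' :: '6' :: '4' :: t) = ['u','i','n','t','6','4','_','t'] ++ pvFixChars t := by
  rw [pvFixChars]
  simp only [List.take, List.drop]
  rw [show pvTable.get? ['u','6','4'] = some ['u','i','n','t','6','4','_','t'] from by decide]

theorem scan_s16 (t : List Char) :
    pvFixChars ('s' :: '1' :: '6' :: t) = ['i','n','t','1','6','_','t'] ++ pvFixChars t := by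
  rw [pvFixChars]
  simp only [List.take, List.drop]
  rw [show pvTable.get? ['s','1','6'] = some ['i','n','t','1','6','_','t'] from by decide]

theorem scan_s32 (t : List Char) :
    pvFixChars ('s' :: '3' :: '2' :: t) = ['i','n','t','3','2','_','t'] ++ pvFixChars t := by
  rw [pvFixChars]
  simp only [List.take, List.drop]
  rw [show pvTable.get? ['s','3','2'] = some ['i','n','t','3','2','_','t'] from by decide]

theorem scan_s64 (t : List Char) :
    pvFixChars ('s' :: '6' :: '4' :: t) = ['i','n','t','6','4','_','t'] ++ pvFixChars t := by
  rw [pvFixChars]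
  simp only [List.take, List.drop]
  rw [show pvTable.get? ['s','6','4'] = some ['i','n','t','6','4','_','t'] from by decide]

theorem scan_u8 (t : List Char) :
    pvFixChars ('u' :: '8' :: t) = ['u','i','n','t','8','_','t'] ++ pvFixChars t := by
  rcases t with _ | ⟨d, t'⟩
  · simp [pvFixChars]
    rw [show pvTable.get? ['u','8'] = some ['u','i','n','t','8','_','t'] from by decide]
  · rw [pvFixChars]
    simp only [List.take, List.drop]
    have h3 : pvTable.get? ['u','8',d] = none :=
      table_get_none _ (by simp) (by simp) (by simp) (by simp) (by simp) (by simp) (by simp) (by simp)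
    rw [h3]
    rw [show pvTable.get? ['u','8'] = some ['u','i','n','t','8','_','t'] from by decide]

theorem scan_s8 (t : List Char) :
    pvFixChars ('s' :: '8' :: t) = ['i','n','t','8','_','t'] ++ pvFixChars t := by
  rcases t with _ | ⟨d, t'⟩
  · simp [pvFixChars]
    rw [show pvTable.get? ['s','8'] = some ['i','n','t','8','_','t'] from by decide]
  · rw [pvFixChars]
    simp only [List.take, List.drop]
    have h3 : pvTable.get? ['s','8',d] = none :=
      table_get_none _ (by simp) (by simp) (by simp) (by simp) (by simp) (by simp) (by simp) (by simp)
    rw [h3]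
    rw [show pvTable.get? ['s','8'] = some ['i','n','t','8','_','t'] from by decide]

theorem scan_other (c : Char) (t : List Char) (hu : c ≠ 'u') (hs : c ≠ 's') :
    pvFixChars (c :: t) = c :: pvFixChars t := by
  rw [pvFixChars]
  simp only [List.take, List.drop]
  have h3 : pvTable.get? (c :: List.take 2 t) = none :=
    table_get_none _ (by simp [hu]) (by simp [hu]) (by simp [hu]) (by simp [hu]) (by simp [hs]) (by simp [hs]) (by simp [hs]) (by simp [hs])
  have h2 : pvTable.get? (c :: List.take 1 t) = none :=
    table_get_none _ (by simp [hu]) (by simp [hu]) (by simp [hu]) (by simp [hu]) (by simp [hs]) (by simp [hs]) (by simp [hs]) (by simp [hs])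
  rw [h3, h2]

theorem scan_u_default (t : List Char)
    (h8 : ¬ ['8'] <+: t) (h16 : ¬ ['1','6'] <+: t)
    (h32 : ¬ ['3','2'] <+: t) (h64 : ¬ ['6','4'] <+: t) :
    pvFixChars ('u' :: t) = 'u' :: pvFixChars t := by
  rw [pvFixChars]
  simp only [List.take, List.drop]
  have h3 : pvTable.get? ('u' :: List.take 2 t) = none := by
    apply table_get_none <;> simp <;> intro h
    · exact h8 (take_eq_imp_prefix h)
    · exact h16 (take_eq_imp_prefix h)
    · exact h32 (take_eq_imp_prefix h)
    · exact h64 (take_eq_imp_prefix h)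
  have h2 : pvTable.get? ('u' :: List.take 1 t) = none := by
    apply table_get_none <;> simp <;> intro h
    · exact h8 (take_eq_imp_prefix h)
    · have := congrArg List.length h; simp at this; omega
    · have := congrArg List.length h; simp at this; omega
    · have := congrArg List.length h; simp at this; omega
  rw [h3, h2]

theorem scan_s_default (t : List Char)
    (h8 : ¬ ['8'] <+: t) (h16 : ¬ ['1','6'] <+: t)
    (h32 : ¬ ['3','2'] <+: t) (h64 : ¬ ['6','4'] <+: t) :
    pvFixChars ('s' :: t) = 's' :: pvFixChars t := by
  rw [pvFixChars]
  simp only [List.take, List.drop]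
  have h3 : pvTable.get? ('s' :: List.take 2 t) = none := by
    apply table_get_none <;> simp <;> intro h
    · exact h8 (take_eq_imp_prefix h)
    · exact h16 (take_eq_imp_prefix h)
    · exact h32 (take_eq_imp_prefix h)
    · exact h64 (take_eq_imp_prefix h)
  have h2 : pvTable.get? ('s' :: List.take 1 t) = none := by
    apply table_get_none <;> simp <;> intro h
    · exact h8 (take_eq_imp_prefix h)
    · have := congrArg List.length h; simp at this; omega
    · have := congrArg List.length h; simp at this; omega
    · have := congrArg List.length h; simp at this; omega
  rw [h3, h2]

-- ===== the main per-string equivalence =====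

theorem comp_eq_scan : ∀ (cs : List Char), pvComp cs = pvFixChars cs := by
  have key : ∀ n (cs : List Char), cs.length ≤ n → pvComp cs = pvFixChars cs := by
    intro n
    induction n with
    | zero =>
      intro cs h
      have : cs = [] := List.length_eq_zero_iff.mp (Nat.le_zero.mp h)
      subst this
      rw [comp_nil, scan_nil]
    | succ n ih =>
      intro cs h
      match cs with
      | [] => rw [comp_nil, scan_nil]
      | c :: t =>
        simp only [List.length_cons] at h
        by_cases hu : c = 'u'
        · subst hu
          by_cases h16 : ['1','6'] <+: t
          · obtain ⟨z, rfl⟩ := h16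
            rw [show (['1','6'] : List Char) ++ z = '1' :: '6' :: z from rfl] at h ⊢
            rw [comp_u16, scan_u16, ih z (by simp at h; omega)]
          · by_cases h32 : ['3','2'] <+: t
            · obtain ⟨z, rfl⟩ := h32
              rw [show (['3','2'] : List Char) ++ z = '3' :: '2' :: z from rfl] at h ⊢
              rw [comp_u32, scan_u32, ih z (by simp at h; omega)]
            · by_cases h64 : ['6','4'] <+: t
              · obtain ⟨z, rfl⟩ := h64
                rw [show (['6','4'] : List Char) ++ z = '6' :: '4' :: z from rfl] at h ⊢
                rw [comp_u64, scan_u64, ih z (by simp at h; omega)]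
              · by_cases h8 : ['8'] <+: t
                · obtain ⟨z, rfl⟩ := h8
                  rw [show (['8'] : List Char) ++ z = '8' :: z from rfl] at h ⊢
                  rw [comp_u8, scan_u8, ih z (by simp at h; omega)]
                · rw [comp_u_default t h8 h16 h32 h64, scan_u_default t h8 h16 h32 h64,
                      ih t (by omega)]
        · by_cases hs : c = 's'
          · subst hs
            by_cases h16 : ['1','6'] <+: t
            · obtain ⟨z, rfl⟩ := h16
              rw [show (['1','6'] : List Char) ++ z = '1' :: '6' :: z from rfl] at h ⊢
              rw [comp_s16, scan_s16, ih z (by simp at h; omega)]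
            · by_cases h32 : ['3','2'] <+: t
              · obtain ⟨z, rfl⟩ := h32
                rw [show (['3','2'] : List Char) ++ z = '3' :: '2' :: z from rfl] at h ⊢
                rw [comp_s32, scan_s32, ih z (by simp at h; omega)]
              · by_cases h64 : ['6','4'] <+: t
                · obtain ⟨z, rfl⟩ := h64
                  rw [show (['6','4'] : List Char) ++ z = '6' :: '4' :: z from rfl] at h ⊢
                  rw [comp_s64, scan_s64, ih z (by simp at h; omega)]
                · by_cases h8 : ['8'] <+: t
                  · obtain ⟨z, rfl⟩ := h8
                    rw [show (['8'] : List Char) ++ z = '8' :: z from rfl] at h ⊢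
                    rw [comp_s8, scan_s8, ih z (by simp at h; omega)]
                  · rw [comp_s_default t h8 h16 h32 h64, scan_s_default t h8 h16 h32 h64,
                        ih t (by omega)]
          · rw [comp_other c t hu hs, scan_other c t hu hs, ih t (by omega)]
  exact fun cs => key cs.length cs le_rfl

-- the A-side per-element string chain equals pvComp on char lists
theorem chainA_toList (p : String) :
    (PySem.Str.replace (PySem.Str.replace (PySem.Str.replace (PySem.Str.replace
      (PySem.Str.replace (PySem.Str.replace (PySem.Str.replace (PySem.Str.replace
        p "u8" "uint8_t") "u16" "uint16_t") "u32" "uint32_t") "u64" "uint64_t")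
        "s8" "int8_t") "s16" "int16_t") "s32" "int32_t") "s64" "int64_t").toList
      = pvComp p.toList := by
  simp only [PySem.Str.toList_replace]
  rw [show ("s64".toList) = ['s','6','4'] from rfl, show ("int64_t".toList) = ['i','n','t','6','4','_','t'] from rfl,
     show ("s32".toList) = ['s','3','2'] from rfl, show ("int32_t".toList) = ['i','n','t','3','2','_','t'] from rfl,
     show ("s16".toList) = ['s','1','6'] from rfl, show ("int16_t".toList) = ['i','n','t','1','6','_','t'] from rfl,
     show ("s8".toList) = ['s','8'] from rfl, show ("int8_t".toList) = ['i','n','t','8','_','t'] from rfl,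
     show ("u64".toList) = ['u','6','4'] from rfl, show ("uint64_t".toList) = ['u','i','n','t','6','4','_','t'] from rfl,
     show ("u32".toList) = ['u','3','2'] from rfl, show ("uint32_t".toList) = ['u','i','n','t','3','2','_','t'] from rfl,
     show ("u16".toList) = ['u','1','6'] from rfl, show ("uint16_t".toList) = ['u','i','n','t','1','6','_','t'] from rfl,
     show ("u8".toList) = ['u','8'] from rfl, show ("uint8_t".toList) = ['u','i','n','t','8','_','t'] from rfl]
  rw [replace_eq_repl, replace_eq_repl, replace_eq_repl, replace_eq_repl,
      replace_eq_repl, replace_eq_repl, replace_eq_repl, replace_eq_repl]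
  rfl

theorem foldl_append_map (f : String → String) (pl acc : List String) :
    pl.foldl (fun a p => a ++ [f p]) acc = acc ++ pl.map f := by
  induction pl generalizing acc with
  | nil => simp
  | cons p pl ih => simp [List.foldl_cons, ih]

-- ===== VERDICT (by name: the statement is the Claim_ definition above) =====
theorem FixStandardType_spec : Claim_equal_FixStandardType := by
  intro param_list _
  unfold Spec_FixStandardType FixStandardType FixStandardType_alt
  rw [foldl_append_map]
  simp only [List.nil_append]
  apply List.map_congr_left
  intro p _
  have h := chainA_toList p
  rw [comp_eq_scan] at h
  calc _ = String.ofList ((PySem.Str.replace (PySem.Str.replace (PySem.Str.replace (PySem.Str.replace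
      (PySem.Str.replace (PySem.Str.replace (PySem.Str.replace (PySem.Str.replace
        p "u8" "uint8_t") "u16" "uint16_t") "u32" "uint32_t") "u64" "uint64_t")
        "s8" "int8_t") "s16" "int16_t") "s32" "int32_t") "s64" "int64_t").toList) :=
        String.ofList_toList.symm
    _ = _ := by rw [h]
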